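-- pv_equiv track=rewrite | github.com/afiege/ai-consultant | backend/tests/test_session_restore.py | infer_navigate_step
-- ===== SOURCE A (Python) =====
-- def infer_navigate_step(current_step: int, factor_types: set) -> int:
--     """Mirror of the inference logic in session_backup.restore_session_backup."""
--     navigate_to_step = current_step
--     if navigate_to_step <= 1:
--         if 'swot_analysis' in factor_types or 'technical_briefing' in factor_types:
--             navigate_to_step = 6
--         elif any(t.startswith('cost_') for t in factor_types):
--             navigate_to_step = 6
--         elif any(t.startswith('business_case') for t in factor_types):
--             navigate_to_step = 5
--         elif factor_types:
--             navigate_to_step = 4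
--     return navigate_to_step
-- ===== SOURCE B (Python) =====
-- def infer_navigate_step(current_step: int, factor_types: set) -> int:
--     best = 0
--     for t in factor_types:
--         if t in ('swot_analysis', 'technical_briefing') or t.startswith('cost_'):
--             p = 3
--         elif t.startswith('business_case'):
--             p = 2
--         else:
--             p = 1
--         if p > best:
--             best = p
--     if current_step <= 1 and best > 0:
--         return {3: 6, 2: 5, 1: 4}[best]
--     return current_step
-- ===== Notes on version B (the rewrite author's own statement) =====
-- stated objective: alternative
-- what changed: Replaces A's short-circuiting branch cascade of three separate scans (two membership tests plus two any() scans) with a single pass that maintains a running maximum priority per factor type, then maps the best priority to a step.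
import Mathlib
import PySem

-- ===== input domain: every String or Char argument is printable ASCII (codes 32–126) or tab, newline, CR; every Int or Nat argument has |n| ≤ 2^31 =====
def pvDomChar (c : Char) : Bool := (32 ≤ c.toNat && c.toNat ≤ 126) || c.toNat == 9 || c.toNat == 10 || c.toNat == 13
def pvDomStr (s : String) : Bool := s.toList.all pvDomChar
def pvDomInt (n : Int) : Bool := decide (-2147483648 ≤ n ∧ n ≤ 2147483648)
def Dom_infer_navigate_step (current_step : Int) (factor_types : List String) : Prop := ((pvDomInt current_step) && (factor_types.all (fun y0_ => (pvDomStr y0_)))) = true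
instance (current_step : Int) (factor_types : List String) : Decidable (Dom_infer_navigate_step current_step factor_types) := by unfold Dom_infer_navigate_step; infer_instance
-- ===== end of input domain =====

-- B replaces A's branch cascade of separate scans with a single pass keeping a running maximum
-- priority per factor type, then maps the best priority to a step (alternative decomposition).


-- ===== PORT A =====
-- literal transliteration of A: branch cascade over membership tests and any() scans
def infer_navigate_step (current_step : Int) (factor_types : List String) : Int :=
  let navigate_to_step := current_step
  if navigate_to_step ≤ 1 then
    if factor_types.contains "swot_analysis" || factor_types.contains "technical_briefing" then 6
    else if factor_types.any (fun t => PySem.Str.startswith t "cost_") then 6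
    else if factor_types.any (fun t => PySem.Str.startswith t "business_case") then 5
    else if !factor_types.isEmpty then 4
    else navigate_to_step
  else navigate_to_step

-- ===== PORT B =====
-- B: one pass computing a running best priority, then map the best priority to a step
def pvPrio (t : String) : Nat :=
  if t = "swot_analysis" || t = "technical_briefing" || PySem.Str.startswith t "cost_" then 3
  else if PySem.Str.startswith t "business_case" then 2
  else 1

def infer_navigate_step_alt (current_step : Int) (factor_types : List String) : Int :=
  let best := factor_types.foldl (fun b t => if pvPrio t > b then pvPrio t else b) 0
  if current_step ≤ 1 && best > 0 then
    if best = 3 then 6 else if best = 2 then 5 else 4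
  else current_step

-- ===== PRECONDITION & SPEC =====
def Spec_infer_navigate_step (current_step : Int) (factor_types : List String) (out : Int) : Prop := out = infer_navigate_step_alt current_step factor_types
instance (current_step : Int) (factor_types : List String) (out : Int) : Decidable (Spec_infer_navigate_step current_step factor_types out) := by unfold Spec_infer_navigate_step; infer_instance

-- ===== CLAIM (what is proved, stated in full; the proofs are below) =====
def Claim_equal_infer_navigate_step : Prop := ∀ (current_step : Int) (factor_types : List String), Dom_infer_navigate_step current_step factor_types → Spec_infer_navigate_step current_step factor_types (infer_navigate_step current_step factor_types)

-- ===== LEMMAS AND PROOFS =====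

theorem pvStep_eq_max :
    (fun (b : Nat) (t : String) => if pvPrio t > b then pvPrio t else b) =
      fun b t => max b (pvPrio t) := by
  funext b t; split_ifs <;> omega

theorem pvPrio_cases (t : String) : pvPrio t = 3 ∨ pvPrio t = 2 ∨ pvPrio t = 1 := by
  unfold pvPrio; split_ifs <;> simp

theorem pvFoldl_max (l : List String) (b : Nat) :
    l.foldl (fun b t => max b (pvPrio t)) b =
      max b (l.foldl (fun b t => max b (pvPrio t)) 0) := by
  induction l generalizing b with
  | nil => simp
  | cons h t ih => simp only [List.foldl_cons]; rw [ih, ih (max 0 (pvPrio h))]; omega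

theorem pvBest0_eq (l : List String) :
    l.foldl (fun b t => max b (pvPrio t)) 0 =
      if l.any (fun t => decide (pvPrio t = 3)) then 3
      else if l.any (fun t => decide (pvPrio t = 2)) then 2
      else if l.isEmpty then 0 else 1 := by
  induction l with
  | nil => simp
  | cons h t ih =>
    simp only [List.foldl_cons, List.any_cons, List.isEmpty_cons]
    rw [pvFoldl_max, ih]
    rcases pvPrio_cases h with hp | hp | hp <;> rw [hp] <;> split_ifs <;> simp_all <;>
      first | omega | aesop

theorem pvPrio3_iff (t : String) : pvPrio t = 3 ↔
    (t = "swot_analysis" ∨ t = "technical_briefing" ∨ PySem.Str.startswith t "cost_" = true) := by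
  unfold pvPrio
  rcases hsw : decide (t = "swot_analysis") <;>
    rcases htb : decide (t = "technical_briefing") <;>
      rcases hco : PySem.Str.startswith t "cost_" <;>
        rcases hbc : PySem.Str.startswith t "business_case" <;> simp_all

theorem pvPrio2_iff (t : String) : pvPrio t = 2 ↔
    (¬(t = "swot_analysis" ∨ t = "technical_briefing" ∨ PySem.Str.startswith t "cost_" = true) ∧
      PySem.Str.startswith t "business_case" = true) := by
  unfold pvPrio
  rcases hsw : decide (t = "swot_analysis") <;>
    rcases htb : decide (t = "technical_briefing") <;>
      rcases hco : PySem.Str.startswith t "cost_" <;>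
        rcases hbc : PySem.Str.startswith t "business_case" <;> simp_all

theorem pvCondA_iff (l : List String) :
    (l.contains "swot_analysis" || l.contains "technical_briefing"
      || l.any (fun t => PySem.Str.startswith t "cost_")) = true ↔
      ∃ t ∈ l, pvPrio t = 3 := by
  simp only [Bool.or_eq_true, List.contains_iff_mem, List.any_eq_true]
  constructor
  · rintro ((h | h) | ⟨t, ht, h⟩)
    · exact ⟨_, h, (pvPrio3_iff _).mpr (Or.inl rfl)⟩
    · exact ⟨_, h, (pvPrio3_iff _).mpr (Or.inr (Or.inl rfl))⟩
    · exact ⟨t, ht, (pvPrio3_iff _).mpr (Or.inr (Or.inr h))⟩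
  · rintro ⟨t, ht, h⟩
    rcases (pvPrio3_iff t).mp h with h | h | h
    · exact Or.inl (Or.inl (h ▸ ht))
    · exact Or.inl (Or.inr (h ▸ ht))
    · exact Or.inr ⟨t, ht, h⟩

theorem pvCondBC_iff (l : List String) (h3 : ¬ ∃ t ∈ l, pvPrio t = 3) :
    (l.any fun t => PySem.Str.startswith t "business_case") = true ↔
      ∃ t ∈ l, pvPrio t = 2 := by
  simp only [List.any_eq_true]
  constructor
  · rintro ⟨t, ht, hbc⟩
    refine ⟨t, ht, (pvPrio2_iff t).mpr ⟨fun hc => h3 ⟨t, ht, (pvPrio3_iff t).mpr hc⟩, hbc⟩⟩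
  · rintro ⟨t, ht, h⟩
    exact ⟨t, ht, ((pvPrio2_iff t).mp h).2⟩

-- ===== VERDICT (by name: the statement is the Claim_ definition above) =====
theorem infer_navigate_step_spec : Claim_equal_infer_navigate_step := by
  intro cs fts _
  unfold Spec_infer_navigate_step infer_navigate_step infer_navigate_step_alt
  rw [pvStep_eq_max, pvBest0_eq]
  by_cases hcs : cs ≤ 1
  · simp only [if_pos hcs, hcs, decide_true, Bool.true_and]
    by_cases H3 : ∃ t ∈ fts, pvPrio t = 3
    · have hany3 : (fts.any fun t => decide (pvPrio t = 3)) = true := by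
        simp only [List.any_eq_true, decide_eq_true_eq]; exact H3
      have hA := (pvCondA_iff fts).mpr H3
      rcases Bool.or_eq_true_iff.mp hA with h | h
      · simp only [h, hany3]; norm_num
      · rcases Bool.eq_false_or_eq_true (fts.contains "swot_analysis"
            || fts.contains "technical_briefing") with h12 | h12
        · simp only [h12, h, hany3]; norm_num
        · simp only [h12, h, hany3]; norm_num
    · have hany3 : (fts.any fun t => decide (pvPrio t = 3)) = false := by
        simp only [List.any_eq_false, decide_eq_true_eq]
        intro t ht hc; exact H3 ⟨t, ht, hc⟩
      have hA : (fts.contains "swot_analysis" || fts.contains "technical_briefing"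
          || fts.any (fun t => PySem.Str.startswith t "cost_")) = false := by
        rcases Bool.eq_false_or_eq_true (fts.contains "swot_analysis"
            || fts.contains "technical_briefing"
            || fts.any (fun t => PySem.Str.startswith t "cost_")) with h | h
        · exact absurd ((pvCondA_iff fts).mp h) H3
        · exact h
      rcases Bool.or_eq_false_iff.mp hA with ⟨h12, hco⟩
      by_cases H2 : ∃ t ∈ fts, pvPrio t = 2
      · have hbc : (fts.any fun t => PySem.Str.startswith t "business_case") = true :=
          (pvCondBC_iff fts H3).mpr H2
        have hany2 : (fts.any fun t => decide (pvPrio t = 2)) = true := by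
          simp only [List.any_eq_true, decide_eq_true_eq]; exact H2
        simp only [h12, hco, hbc, hany3, hany2]; norm_num
      · have hbc : (fts.any fun t => PySem.Str.startswith t "business_case") = false := by
          rcases Bool.eq_false_or_eq_true
              (fts.any fun t => PySem.Str.startswith t "business_case") with h | h
          · exact absurd ((pvCondBC_iff fts H3).mp h) H2
          · exact h
        have hany2 : (fts.any fun t => decide (pvPrio t = 2)) = false := by
          simp only [List.any_eq_false, decide_eq_true_eq]
          intro t ht hc; exact H2 ⟨t, ht, hc⟩
        cases fts with
        | nil => simp
        | cons h t =>
          simp only [h12, hco, hbc, hany3, hany2, List.isEmpty_cons, Bool.not_false]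
          norm_num
  · simp [hcs]
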